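-- pv_equiv track=rewrite | github.com/pmwasson/froggo | images/parallax.py | shift7bRight
-- ===== SOURCE A (Python) =====
-- def shift7bRight(data,shift,msb):
--     result = []
--     shiftMod = shift % 7
--     remainder = ((data[0] << (8-shiftMod)) & 0xff) >> 1
--     for value in data[::-1]:
--         result.append(((value & 0x7f) >> shiftMod) | remainder | msb)
--         remainder = ((value << (8-shiftMod)) & 0xff) >> 1
--     result.reverse()
--     return(result)
-- ===== SOURCE B (Python) =====
-- def shift7bRight(data, shift, msb):
--     n = len(data)
--     s = shift % 7
--     return [((data[j] & 0x7f) >> s)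
--             | (((data[(j + 1) % n] << (8 - s)) & 0xff) >> 1)
--             | msb
--             for j in range(n)]
-- ===== Notes on version B (the rewrite author's own statement) =====
-- stated objective: simpler
-- what changed: Replaced A's backward accumulate (iterate data reversed, thread a carry remainder through mutable state, then reverse the result) by a single stateless forward list comprehension that reads each element's carry directly from the next element with modular indexing.
import Mathlib
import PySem

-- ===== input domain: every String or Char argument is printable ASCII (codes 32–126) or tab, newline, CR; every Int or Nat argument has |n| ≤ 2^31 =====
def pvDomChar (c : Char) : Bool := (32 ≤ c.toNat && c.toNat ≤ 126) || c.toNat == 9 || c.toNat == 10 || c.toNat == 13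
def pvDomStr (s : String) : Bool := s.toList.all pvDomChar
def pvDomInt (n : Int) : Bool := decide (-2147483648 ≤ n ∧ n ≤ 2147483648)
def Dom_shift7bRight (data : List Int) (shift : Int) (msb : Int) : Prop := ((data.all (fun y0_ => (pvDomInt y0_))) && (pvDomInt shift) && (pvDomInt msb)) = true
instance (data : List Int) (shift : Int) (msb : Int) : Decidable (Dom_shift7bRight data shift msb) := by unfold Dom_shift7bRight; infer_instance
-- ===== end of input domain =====

-- B replaces A's backwards accumulate-with-carry-state-then-reverse by a single stateless
-- forward map with modular indexing (objective: simpler; same O(n) cost).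

-- ===== PORT A =====
def shift7bRight (data : List Int) (shift : Int) (msb : Int) : List Int :=
  match data with
  | [] => []  -- unreachable under Pre_: Python's data[0] raises IndexError here
  | d0 :: _ =>
    let shiftMod : Nat := (PySem.Int.mod shift 7).toNat  -- shift % 7 ∈ [0,7): exact as Nat
    let remainder : Int := PySem.Int.band (d0 <<< (8 - shiftMod)) 255 >>> 1
    -- for value in data[::-1]: append(...), update remainder; then result.reverse()
    ((data.reverse.foldl
        (fun (st : List Int × Int) (value : Int) =>
          (st.1 ++ [PySem.Int.bor (PySem.Int.bor (PySem.Int.band value 127 >>> shiftMod) st.2) msb],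
           PySem.Int.band (value <<< (8 - shiftMod)) 255 >>> 1))
        ([], remainder)).1).reverse

-- ===== PORT B =====
def shift7bRight_alt (data : List Int) (shift : Int) (msb : Int) : List Int :=
  let n := data.length
  let s : Nat := (PySem.Int.mod shift 7).toNat  -- shift % 7 ∈ [0,7): exact as Nat
  (List.range n).map (fun j =>
    PySem.Int.bor (PySem.Int.bor (PySem.Int.band (data.getD j 0) 127 >>> s)
      (PySem.Int.band (data.getD ((j + 1) % n) 0 <<< (8 - s)) 255 >>> 1)) msb)

-- ===== PRECONDITION & SPEC =====
-- A evaluates data[0] before its loop, so it raises IndexError on empty data; Pre_ excludes exactly that.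
def Pre_shift7bRight (data : List Int) (shift : Int) (msb : Int) : Prop := data ≠ []
instance (data : List Int) (shift : Int) (msb : Int) : Decidable (Pre_shift7bRight data shift msb) := by unfold Pre_shift7bRight; infer_instance
def pvWitness_shift7bRight : List Int × Int × Int := ([1, 2], 3, 128)

def Spec_shift7bRight (data : List Int) (shift : Int) (msb : Int) (out : List Int) : Prop := out = shift7bRight_alt data shift msb
instance (data : List Int) (shift : Int) (msb : Int) (out : List Int) : Decidable (Spec_shift7bRight data shift msb out) := by unfold Spec_shift7bRight; infer_instance

-- ===== CLAIM (what is proved, stated in full; the proofs are below) =====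
def Claim_equal_shift7bRight : Prop := ∀ (data : List Int) (shift : Int) (msb : Int), Dom_shift7bRight data shift msb → Pre_shift7bRight data shift msb → Spec_shift7bRight data shift msb (shift7bRight data shift msb)
-- ===== LEMMAS AND PROOFS =====

-- the two per-byte operations, parametrised by s = shift % 7 and msb
def pvF (s : Nat) (msb : Int) (v r : Int) : Int :=
  PySem.Int.bor (PySem.Int.bor (PySem.Int.band v 127 >>> s) r) msb
def pvG (s : Nat) (v : Int) : Int :=
  PySem.Int.band (v <<< (8 - s)) 255 >>> 1

-- A's loop, as the list it appends (remainder threaded forward)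
def pvLoop (s : Nat) (msb : Int) : List Int → Int → List Int
  | [], _ => []
  | v :: t, r => pvF s msb v r :: pvLoop s msb t (pvG s v)

-- the common canonical form: pairwise carries, last element fed the initial remainder c
def pvCanon (s : Nat) (msb : Int) (xs : List Int) (c : Int) : List Int :=
  List.zipWith (fun a b => pvF s msb a (pvG s b)) xs xs.tail ++
    (if xs = [] then [] else [pvF s msb (xs.getLastD 0) c])

theorem pvFold_eq (s : Nat) (msb : Int) (xs : List Int) (acc : List Int) (r : Int) :
    (xs.foldl
      (fun (st : List Int × Int) (value : Int) =>
        (st.1 ++ [PySem.Int.bor (PySem.Int.bor (PySem.Int.band value 127 >>> s) st.2) msb],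
         PySem.Int.band (value <<< (8 - s)) 255 >>> 1))
      (acc, r)).1 = acc ++ pvLoop s msb xs r := by
  induction xs generalizing acc r with
  | nil => simp [pvLoop]
  | cons v t ih => simp [pvLoop, ih, pvF, pvG]

theorem pvLoop_append (s : Nat) (msb : Int) (as_ bs : List Int) (c : Int) :
    pvLoop s msb (as_ ++ bs) c =
      pvLoop s msb as_ c ++ pvLoop s msb bs (if as_ = [] then c else pvG s (as_.getLastD 0)) := by
  induction as_ generalizing c with
  | nil => simp [pvLoop]
  | cons a t ih =>
    simp only [List.cons_append, pvLoop, ih]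
    cases t with
    | nil => simp [pvLoop]
    | cons y t' => simp

theorem pvLoop_rev (s : Nat) (msb : Int) (xs : List Int) (c : Int) :
    (pvLoop s msb xs.reverse c).reverse = pvCanon s msb xs c := by
  induction xs generalizing c with
  | nil => simp [pvLoop, pvCanon]
  | cons x t ih =>
    have hrev : (x :: t).reverse = t.reverse ++ [x] := by simp
    rw [hrev, pvLoop_append]
    cases t with
    | nil => simp [pvLoop, pvCanon]
    | cons y t' =>
      have hr : (if (y :: t').reverse = [] then c else pvG s ((y :: t').reverse.getLastD 0)) = pvG s y := by
        simp [List.getLastD_eq_getLast?, List.getLast?_reverse]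
      rw [hr, List.reverse_append]
      have hone : (pvLoop s msb [x] (pvG s y)).reverse = [pvF s msb x (pvG s y)] := by
        simp [pvLoop]
      rw [hone, ih, List.singleton_append]
      simp [pvCanon, List.getLastD_eq_getLast?]

theorem pvCanon_getElem (s : Nat) (msb : Int) (xs : List Int) (c : Int) (j : Nat)
    (hj : j < xs.length) (hne : xs ≠ []) :
    (pvCanon s msb xs c).length = xs.length ∧
    (pvCanon s msb xs c)[j]'(by
      simp [pvCanon, hne, List.length_zipWith, List.length_tail]
      omega) =
      if h : j + 1 < xs.length then pvF s msb xs[j] (pvG s xs[j+1])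
      else pvF s msb (xs.getLastD 0) c := by
  have hlen : (pvCanon s msb xs c).length = xs.length := by
    simp [pvCanon, hne, List.length_zipWith, List.length_tail]
    omega
  refine ⟨hlen, ?_⟩
  by_cases h : j + 1 < xs.length
  · rw [dif_pos h]
    have hz : j < (List.zipWith (fun a b => pvF s msb a (pvG s b)) xs xs.tail).length := by
      simp [List.length_zipWith, List.length_tail]; omega
    unfold pvCanon
    rw [List.getElem_append_left hz, List.getElem_zipWith]
    congr 1
    rw [List.getElem_tail]
  · rw [dif_neg h]
    have hj' : j = xs.length - 1 := by omega
    have hz : (List.zipWith (fun a b => pvF s msb a (pvG s b)) xs xs.tail).length = xs.length - 1 := by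
      simp [List.length_zipWith, List.length_tail]
    unfold pvCanon
    rw [List.getElem_append_right (by omega)]
    simp [hne, hz, hj']

-- ===== VERDICT (by name: the statement is the Claim_ definition above) =====
theorem shift7bRight_spec : Claim_equal_shift7bRight := by
  intro data shift msb _hdom hpre
  unfold Spec_shift7bRight
  obtain ⟨d0, t, rfl⟩ : ∃ d0 t, data = d0 :: t := by
    cases data with
    | nil => exact absurd rfl hpre
    | cons a b => exact ⟨a, b, rfl⟩
  generalize hs : (PySem.Int.mod shift 7).toNat = s
  have hne : (d0 :: t) ≠ [] := by simp
  have hA : shift7bRight (d0 :: t) shift msb = (pvLoop s msb (d0 :: t).reverse (pvG s d0)).reverse := by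
    simp only [shift7bRight, hs]
    have hg : PySem.Int.band (d0 <<< (8 - s)) 255 >>> 1 = pvG s d0 := rfl
    rw [hg, pvFold_eq s msb _ [] (pvG s d0), List.nil_append]
  rw [hA, pvLoop_rev]
  have hclen : (pvCanon s msb (d0 :: t) (pvG s d0)).length = (d0 :: t).length :=
    (pvCanon_getElem s msb (d0 :: t) (pvG s d0) 0 (by simp) hne).1
  have hblen : (shift7bRight_alt (d0 :: t) shift msb).length = (d0 :: t).length := by
    simp [shift7bRight_alt]
  apply List.ext_getElem (by rw [hclen, hblen])
  intro j hj1 hj2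
  have hjlen : j < (d0 :: t).length := by rw [hclen] at hj1; exact hj1
  rw [(pvCanon_getElem s msb (d0 :: t) (pvG s d0) j hjlen hne).2]
  simp only [shift7bRight_alt, List.getElem_map, List.getElem_range, hs]
  by_cases h : j + 1 < (d0 :: t).length
  · rw [dif_pos h]
    have hmod : (j + 1) % (d0 :: t).length = j + 1 := Nat.mod_eq_of_lt h
    rw [hmod, List.getD_eq_getElem _ _ hjlen, List.getD_eq_getElem _ _ h]
    rfl
  · rw [dif_neg h]
    have hj' : j = t.length := by simp only [List.length_cons] at h hjlen; omega
    subst hj'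
    have hmod : (t.length + 1) % (d0 :: t).length = 0 := by
      simp [List.length_cons]
    have hlast : (d0 :: t).getLastD 0 = (d0 :: t)[t.length]'hjlen := by
      rw [List.getLastD_eq_getLast?, List.getLast?_eq_getElem?]
      simp
      rfl
    rw [hmod, List.getD_eq_getElem _ _ hjlen, List.getD_eq_getElem _ _ (by simp), hlast]
    rfl
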